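-- pv_equiv track=rewrite | github.com/placerte/wav-to-freq | src/wav_to_freq/reporting/renderers/markdown.py | _flatten_headers
-- ===== SOURCE A (Python) =====
-- def _flatten_headers(
--     headers: list[str], header_groups: list[tuple[str, int]] | None
-- ) -> list[str]:
--     if not header_groups:
--         return headers
--
--     flat: list[str] = []
--     idx = 0
--     for label, span in header_groups:
--         for _ in range(span):
--             if idx >= len(headers):
--                 break
--             suffix = headers[idx]
--             idx += 1
--             if label:
--                 flat.append(f"{label} {suffix}".strip())
--             else:
--                 flat.append(suffix)
--     flat.extend(headers[idx:])
--     return flat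
-- ===== SOURCE B (Python) =====
-- def _flatten_headers(
--     headers: list[str], header_groups: list[tuple[str, int]] | None
-- ) -> list[str]:
--     if not header_groups:
--         return headers
--
--     # Build a label (or None) for every header position, then one zip pass.
--     labels: list = []
--     for label, span in header_groups:
--         room = len(headers) - len(labels)
--         if room <= 0:
--             break
--         labels.extend([label] * min(span, room))
--     labels.extend([None] * (len(headers) - len(labels)))
--
--     out: list[str] = []
--     for label, header in zip(labels, headers):
--         if label is None or label == "":
--             out.append(header)
--         else:
--             out.append(f"{label} {header}".strip())
--     return out
-- ===== Notes on version B (the rewrite author's own statement) =====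
-- stated objective: alternative
-- what changed: B first materializes a per-header label list (each group's label repeated span times, truncated to len(headers) and padded with None), then emits the output in a single pass over zip(labels, headers), instead of A's nested group-by-span loop with a running index and a trailing extend.
import Mathlib
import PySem

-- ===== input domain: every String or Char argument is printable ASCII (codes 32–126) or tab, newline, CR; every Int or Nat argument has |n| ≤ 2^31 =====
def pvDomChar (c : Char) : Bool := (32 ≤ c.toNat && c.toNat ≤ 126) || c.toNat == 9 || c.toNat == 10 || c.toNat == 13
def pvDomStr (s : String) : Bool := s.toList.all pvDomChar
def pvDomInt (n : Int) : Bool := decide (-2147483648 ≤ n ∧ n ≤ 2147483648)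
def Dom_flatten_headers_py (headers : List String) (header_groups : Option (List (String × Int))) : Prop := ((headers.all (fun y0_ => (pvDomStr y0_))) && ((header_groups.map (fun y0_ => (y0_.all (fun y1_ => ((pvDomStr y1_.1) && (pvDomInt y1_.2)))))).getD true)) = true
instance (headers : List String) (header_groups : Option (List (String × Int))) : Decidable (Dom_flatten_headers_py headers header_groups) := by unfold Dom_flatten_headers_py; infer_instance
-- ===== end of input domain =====

-- B flattens via a precomputed per-header label list consumed in one zip pass (alternative decomposition, same cost).


-- ===== PORT A =====
-- inner `for _ in range(span)` loop of A: state (flat, idx); `break` when idx >= len(headers)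
def pvAinner (headers : List String) (label : String) : Nat → List String × Int → List String × Int
  | 0, st => st
  | n+1, (flat, idx) =>
    if (headers.length : Int) ≤ idx then (flat, idx)   -- if idx >= len(headers): break
    else
      -- suffix = headers[idx]  (in range: the guard gives idx < len and the loop keeps 0 ≤ idx)
      let suffix := (PySem.List.pyGet? headers idx).getD ""
      let flat' := if label ≠ "" then flat ++ [PySem.Str.strip (label ++ " " ++ suffix)]
                   else flat ++ [suffix]
      pvAinner headers label n (flat', idx + 1)

def flatten_headers_py (headers : List String) (header_groups : Option (List (String × Int))) : List String :=
  match header_groups with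
  | none => headers        -- `if not header_groups` (None)
  | some [] => headers     -- `if not header_groups` (empty list)
  | some gs =>
    let st := gs.foldl (fun st g => pvAinner headers g.1 g.2.toNat st) ([], (0 : Int))
    st.1 ++ PySem.List.slice headers (some st.2) none   -- flat.extend(headers[idx:])

-- ===== PORT B =====
-- B's first loop: one label per header position, `break` once the label list is full
def pvBlabels (hlen : Nat) : List (String × Int) → List (Option String) → List (Option String)
  | [], labels => labels
  | (label, span) :: rest, labels =>
    if (hlen : Int) - labels.length ≤ 0 then labels   -- room = len(headers) - len(labels); break
    else pvBlabels hlen rest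
      (labels ++ List.replicate (min span ((hlen : Int) - labels.length)).toNat (some label))

def flatten_headers_py_alt (headers : List String) (header_groups : Option (List (String × Int))) : List String :=
  match header_groups with
  | some (g :: rest) =>   -- `if not header_groups` is false exactly on a non-empty list
    let gs := g :: rest
    let labels0 := pvBlabels headers.length gs []
    let labels := labels0 ++ List.replicate (headers.length - labels0.length) (none : Option String)
    (labels.zip headers).foldl
      (fun out lh =>
        match lh.1 with
        | none => out ++ [lh.2]
        | some lab => if lab = "" then out ++ [lh.2]
                      else out ++ [PySem.Str.strip (lab ++ " " ++ lh.2)]) []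
  | _ => headers

-- ===== PRECONDITION & SPEC =====
def Spec_flatten_headers_py (headers : List String) (header_groups : Option (List (String × Int))) (out : List String) : Prop := out = flatten_headers_py_alt headers header_groups
instance (headers : List String) (header_groups : Option (List (String × Int))) (out : List String) : Decidable (Spec_flatten_headers_py headers header_groups out) := by unfold Spec_flatten_headers_py; infer_instance

-- ===== CLAIM (what is proved, stated in full; the proofs are below) =====
def Claim_equal_flatten_headers_py : Prop := ∀ (headers : List String) (header_groups : Option (List (String × Int))), Dom_flatten_headers_py headers header_groups → Spec_flatten_headers_py headers header_groups (flatten_headers_py headers header_groups)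

-- ===== LEMMAS AND PROOFS =====

-- what B does to one (label?, header) pair
def pvApp : Option String → String → String
  | none, h => h
  | some lab, h => if lab = "" then h else PySem.Str.strip (lab ++ " " ++ h)

-- what A does to one header under a group label
def pvAppS (label h : String) : String :=
  if label ≠ "" then PySem.Str.strip (label ++ " " ++ h) else h

theorem pvApp_some (lab h : String) : pvApp (some lab) h = pvAppS lab h := by
  by_cases he : lab = "" <;> simp [pvApp, pvAppS, he]

-- closed form of B's label list, parametrised by the remaining room k
def pvLab : List (String × Int) → Nat → List (Option String)
  | [], _ => []
  | (label, span) :: gs, k =>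
    if k = 0 then []
    else List.replicate (min span.toNat k) (some label) ++ pvLab gs (k - min span.toNat k)

-- closed form of A's computation, consuming the remaining headers
def pvRun : List (String × Int) → List String → List String
  | [], rem => rem
  | (label, span) :: gs, rem =>
    (rem.take span.toNat).map (pvAppS label) ++ pvRun gs (rem.drop span.toNat)

-- closed form of B's computation
def pvM (gs : List (String × Int)) (rem : List String) : List String :=
  ((pvLab gs rem.length ++ List.replicate (rem.length - (pvLab gs rem.length).length) (none : Option String)).zip rem).map
    (fun lh => pvApp lh.1 lh.2)

theorem pvLab_length_le (gs : List (String × Int)) (k : Nat) : (pvLab gs k).length ≤ k := by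
  induction gs generalizing k with
  | nil => simp [pvLab]
  | cons g gs ih =>
    obtain ⟨label, span⟩ := g
    simp only [pvLab]
    split
    · simp
    · have := ih (k - min span.toNat k)
      simp only [List.length_append, List.length_replicate]
      omega

theorem pvZip_none (rem : List String) :
    ((List.replicate rem.length (none : Option String)).zip rem).map (fun lh => pvApp lh.1 lh.2) = rem := by
  induction rem with
  | nil => rfl
  | cons h t ih => simpa [List.replicate_succ, pvApp] using ih

theorem pvZip_some (lab : String) (m : Nat) (l : List String) (hm : l.length = m) :
    ((List.replicate m (some lab)).zip l).map (fun lh => pvApp lh.1 lh.2) = l.map (pvAppS lab) := by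
  induction l generalizing m with
  | nil => subst hm; rfl
  | cons h t ih =>
    subst hm
    simpa [List.replicate_succ, pvApp_some] using ih t.length rfl

theorem pvZip_split (l1 l2 : List (Option String)) (rem : List String) (h : l1.length ≤ rem.length) :
    (l1 ++ l2).zip rem = l1.zip (rem.take l1.length) ++ l2.zip (rem.drop l1.length) := by
  conv_lhs => rw [← List.take_append_drop l1.length rem]
  rw [List.zip_append (by simp [h])]

theorem pvM_cons (label : String) (span : Int) (gs : List (String × Int)) (rem : List String) :
    pvM ((label, span) :: gs) rem
      = (rem.take span.toNat).map (pvAppS label) ++ pvM gs (rem.drop span.toNat) := by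
  by_cases hk : rem.length = 0
  · have : rem = [] := List.length_eq_zero_iff.mp hk
    subst this; simp [pvM, pvLab]
  · set t := span.toNat with ht
    set m := min t rem.length with hm
    have hmle : m ≤ rem.length := by omega
    have htake : rem.take t = rem.take m := by
      by_cases h : t ≤ rem.length
      · have : m = t := by omega
        rw [this]
      · have : m = rem.length := by omega
        rw [this, List.take_length, List.take_of_length_le (by omega)]
    have hdrop : rem.drop t = rem.drop m := by
      by_cases h : t ≤ rem.length
      · have : m = t := by omega
        rw [this]
      · have : m = rem.length := by omega
        rw [this, List.drop_length, List.drop_eq_nil_of_le (by omega)]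
    have hLlen := pvLab_length_le gs (rem.length - m)
    have step1 : pvM ((label, span) :: gs) rem
        = ((List.replicate m (some label) ++ (pvLab gs (rem.length - m) ++ List.replicate (rem.length - m - (pvLab gs (rem.length - m)).length) (none : Option String))).zip rem).map (fun lh => pvApp lh.1 lh.2) := by
      simp only [pvM, pvLab, if_neg hk, ← ht, ← hm]
      congr 2
      rw [List.append_assoc]
      congr 2
      simp only [List.length_append, List.length_replicate]
      congr 1
      omega
    rw [step1, pvZip_split _ _ _ (by simp [hmle]), List.map_append, List.length_replicate]
    rw [htake, hdrop]
    congr 1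
    · exact pvZip_some label m (rem.take m) (by simp [hmle])
    · simp only [pvM, List.length_drop]

theorem pvRun_eq_pvM (gs : List (String × Int)) (rem : List String) : pvRun gs rem = pvM gs rem := by
  induction gs generalizing rem with
  | nil => simp [pvRun, pvM, pvLab, pvZip_none]
  | cons g gs ih =>
    obtain ⟨label, span⟩ := g
    rw [pvRun, pvM_cons, ih]

-- A's inner loop, characterised
theorem pvAinner_eq (headers : List String) (label : String) (n : Nat) :
    ∀ (i : Nat), i ≤ headers.length → ∀ (flat : List String),
    pvAinner headers label n (flat, (i : Int))
      = (flat ++ ((headers.drop i).take n).map (pvAppS label),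
         ((i + min n (headers.length - i) : Nat) : Int)) := by
  induction n with
  | zero => intro i hi flat; simp [pvAinner]
  | succ n ih =>
    intro i hi flat
    rw [pvAinner]
    by_cases hge : (headers.length : Int) ≤ (i : Int)
    · have : i = headers.length := by exact_mod_cast le_antisymm hi (by exact_mod_cast hge)
      subst this
      rw [if_pos hge]
      simp only [List.drop_length, List.take_nil, List.map_nil, List.append_nil, Nat.sub_self,
        Nat.min_zero, Nat.add_zero]
    · have hlt : i < headers.length := by
        have : ¬ headers.length ≤ i := fun h => hge (by exact_mod_cast h)
        omega
      rw [if_neg hge]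
      have hget : PySem.List.pyGet? headers (i : Int) = some headers[i] := by
        simp [PySem.List.pyGet?_natCast, List.getElem?_eq_getElem hlt]
      simp only [hget, Option.getD_some]
      have hidx : (i : Int) + 1 = ((i + 1 : Nat) : Int) := by push_cast; ring
      rw [hidx, ih (i + 1) (by omega)]
      have hdropi : headers.drop i = headers[i] :: headers.drop (i + 1) :=
        List.drop_eq_getElem_cons hlt
      rw [Prod.mk.injEq]
      refine ⟨?_, ?_⟩
      · rw [hdropi, List.take_succ_cons, List.map_cons]
        by_cases he : label = "" <;> simp [he, pvAppS]
      · congr 1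
        omega

-- A's outer fold plus final extend, characterised
theorem pvAfold_eq (headers : List String) (gs : List (String × Int)) :
    ∀ (i : Nat), i ≤ headers.length → ∀ (flat : List String),
    (gs.foldl (fun st g => pvAinner headers g.1 g.2.toNat st) (flat, (i : Int))).1
      ++ PySem.List.slice headers (some (gs.foldl (fun st g => pvAinner headers g.1 g.2.toNat st) (flat, (i : Int))).2) none
      = flat ++ pvRun gs (headers.drop i) := by
  induction gs with
  | nil =>
    intro i hi flat
    simp [pvRun, PySem.List.slice_from_natCast]
  | cons g gs ih =>
    intro i hi flat
    obtain ⟨label, span⟩ := g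
    simp only [List.foldl_cons]
    rw [pvAinner_eq headers label span.toNat i hi flat]
    set m := min span.toNat (headers.length - i) with hm
    rw [ih (i + m) (by omega)]
    have hdrop : headers.drop (i + m) = (headers.drop i).drop span.toNat := by
      by_cases h : span.toNat ≤ headers.length - i
      · have : m = span.toNat := by omega
        rw [this, List.drop_drop, Nat.add_comm]
      · have : m = headers.length - i := by omega
        rw [this]
        rw [List.drop_eq_nil_of_le (by omega),
            List.drop_eq_nil_of_le (by rw [List.length_drop]; omega)]
    have htake : (headers.drop i).take span.toNat = (headers.drop i).take m := by
      by_cases h : span.toNat ≤ headers.length - i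
      · have : m = span.toNat := by omega
        rw [this]
      · have hlen : (headers.drop i).length = headers.length - i := List.length_drop ..
        have hm' : m = headers.length - i := by omega
        rw [hm', ← hlen, List.take_length, List.take_of_length_le (by omega)]
    rw [pvRun, hdrop, htake]
    simp [List.append_assoc]

-- B's label loop, characterised
theorem pvBlabels_eq (hlen : Nat) (gs : List (String × Int)) :
    ∀ (labels : List (Option String)), labels.length ≤ hlen →
    pvBlabels hlen gs labels = labels ++ pvLab gs (hlen - labels.length) := by
  induction gs with
  | nil => intro labels _; simp [pvBlabels, pvLab]
  | cons g gs ih =>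
    intro labels hle
    obtain ⟨label, span⟩ := g
    rw [pvBlabels]
    set k := hlen - labels.length with hk
    by_cases hz : k = 0
    · rw [if_pos (by omega), pvLab, if_pos hz, List.append_nil]
    · rw [if_neg (by omega)]
      have hmin : (min span ((hlen : Int) - labels.length)).toNat = min span.toNat k := by omega
      rw [hmin]
      rw [ih (labels ++ List.replicate (min span.toNat k) (some label))
            (by simp only [List.length_append, List.length_replicate]; omega)]
      rw [pvLab, if_neg hz, List.append_assoc]
      congr 3
      simp only [List.length_append, List.length_replicate]
      omega

-- B's output fold is a map
theorem pvBfold_eq (l : List (Option String × String)) :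
    ∀ (out : List String),
    l.foldl (fun out lh =>
        match lh.1 with
        | none => out ++ [lh.2]
        | some lab => if lab = "" then out ++ [lh.2]
                      else out ++ [PySem.Str.strip (lab ++ " " ++ lh.2)]) out
      = out ++ l.map (fun lh => pvApp lh.1 lh.2) := by
  induction l with
  | nil => intro out; simp
  | cons lh t ih =>
    intro out
    obtain ⟨l1, h⟩ := lh
    cases l1 with
    | none => simp [ih, pvApp]
    | some lab =>
      by_cases he : lab = "" <;> simp [ih, pvApp, he]

theorem pvA_closed (headers : List String) (g : String × Int) (gs : List (String × Int)) :
    flatten_headers_py headers (some (g :: gs)) = pvRun (g :: gs) headers := by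
  have h := pvAfold_eq headers (g :: gs) 0 (Nat.zero_le _) []
  simp only [Nat.cast_zero, List.drop_zero, List.nil_append] at h
  simpa [flatten_headers_py] using h

theorem pvB_closed (headers : List String) (g : String × Int) (gs : List (String × Int)) :
    flatten_headers_py_alt headers (some (g :: gs)) = pvM (g :: gs) headers := by
  have hl := pvBlabels_eq headers.length (g :: gs) [] (Nat.zero_le _)
  simp only [List.length_nil, Nat.sub_zero, List.nil_append] at hl
  simp only [flatten_headers_py_alt, hl, pvBfold_eq, List.nil_append, pvM]

-- ===== VERDICT (by name: the statement is the Claim_ definition above) =====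
theorem flatten_headers_py_spec : Claim_equal_flatten_headers_py := by
  intro headers header_groups _
  unfold Spec_flatten_headers_py
  match header_groups with
  | none => rfl
  | some [] => rfl
  | some (g :: gs) =>
    rw [pvA_closed, pvB_closed, pvRun_eq_pvM]
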